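-- pv_equiv track=rewrite | github.com/pypi-data/pypi-mirror-380 | packages/bash2gitlab/bash2gitlab-0.9.9.tar.gz/bash2gitlab-0.9.9/bash2gitlab/commands/pipeline_docs.py | parse_description_from_comment
-- ===== SOURCE A (Python) =====
-- def parse_description_from_comment(comment_text: str) -> tuple[str | None, str]:
--     """
--     Parses a clean comment string to find a @Description decorator.
--     The description can be multi-line, continuing until a blank line or another decorator.
--     Returns a tuple of (description, remaining_comment).
--     """
--     lines = comment_text.splitlines()
--     description_lines = []
--     remaining_lines = []
--     in_description = False
--
--     for line in lines:
--         stripped_line = line.strip()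
--         if not in_description and stripped_line.startswith("@Description"):
--             in_description = True
--             desc_part = stripped_line[len("@Description") :].strip()
--             if desc_part:
--                 description_lines.append(desc_part)
--         elif in_description:
--             if not stripped_line or stripped_line.startswith("@"):
--                 in_description = False
--                 remaining_lines.append(line)
--             else:
--                 description_lines.append(stripped_line)
--         else:
--             remaining_lines.append(line)
--
--     description = " ".join(description_lines) if description_lines else None
--     remaining_comment = "\n".join(remaining_lines).strip()
--     return description, remaining_comment if remaining_comment else ""
-- ===== SOURCE B (Python) =====
-- def parse_description_from_comment(comment_text: str) -> tuple[str | None, str]: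
--     lines = comment_text.splitlines()
--     description_lines = []
--     remaining_lines = []
--     i = 0
--     n = len(lines)
--     while i < n:
--         stripped = lines[i].strip()
--         if stripped.startswith("@Description"):
--             inline = stripped[len("@Description"):].strip()
--             if inline:
--                 description_lines.append(inline)
--             i += 1
--             while i < n:
--                 cont = lines[i].strip()
--                 if not cont or cont.startswith("@"):
--                     remaining_lines.append(lines[i])
--                     i += 1
--                     break
--                 description_lines.append(cont)
--                 i += 1
--         else:
--             remaining_lines.append(lines[i])
--             i += 1
--     description = " ".join(description_lines) if description_lines else None
--     remaining_comment = "\n".join(remaining_lines).strip()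
--     return description, remaining_comment if remaining_comment else ""
-- ===== Notes on version B (the rewrite author's own statement) =====
-- stated objective: alternative
-- what changed: Replaces A's single pass with a per-line boolean in_description state machine by an index-free nested-loop decomposition: an outer loop over lines that, on an @Description line, runs an inner loop consuming continuation lines until a blank or @-line terminator.
import Mathlib
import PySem

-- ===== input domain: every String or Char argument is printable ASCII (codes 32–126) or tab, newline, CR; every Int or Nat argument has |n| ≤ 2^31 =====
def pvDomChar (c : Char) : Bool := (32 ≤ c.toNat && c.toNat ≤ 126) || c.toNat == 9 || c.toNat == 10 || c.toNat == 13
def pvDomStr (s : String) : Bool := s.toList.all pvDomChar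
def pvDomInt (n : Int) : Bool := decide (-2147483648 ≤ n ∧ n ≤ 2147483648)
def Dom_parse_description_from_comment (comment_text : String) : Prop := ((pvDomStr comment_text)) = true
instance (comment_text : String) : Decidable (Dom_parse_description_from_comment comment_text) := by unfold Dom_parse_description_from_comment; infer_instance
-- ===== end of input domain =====

-- B replaces A's per-line boolean state machine by an outer loop with a nested
-- inner loop consuming each @Description block (objective: alternative decomposition, same cost).

-- ===== PORT A =====
-- one iteration of A's for-loop; state = (description_lines, remaining_lines, in_description)
def pdcStepA (st : List String × List String × Bool) (line : String) :
    List String × List String × Bool :=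
  let stripped_line := PySem.Str.strip line
  if (!st.2.2) && PySem.Str.startswith stripped_line "@Description" then
    let desc_part := PySem.Str.strip (PySem.Str.slice stripped_line (some 12) none)
    (if desc_part ≠ "" then st.1 ++ [desc_part] else st.1, st.2.1, true)
  else if st.2.2 then
    if stripped_line = "" || PySem.Str.startswith stripped_line "@" then
      (st.1, st.2.1 ++ [line], false)
    else
      (st.1 ++ [stripped_line], st.2.1, st.2.2)
  else
    (st.1, st.2.1 ++ [line], st.2.2)

def parse_description_from_comment (comment_text : String) : Option String × String :=
  let lines := PySem.Str.splitlines comment_text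
  let st := lines.foldl pdcStepA ([], [], false)
  let description := if st.1 ≠ [] then some (PySem.Str.join " " st.1) else none
  let remaining_comment := PySem.Str.strip (PySem.Str.join "\n" st.2.1)
  (description, if remaining_comment ≠ "" then remaining_comment else "")

-- ===== PORT B =====
-- B's outer while-loop (pdcOuter) and the inner continuation-consuming while-loop (pdcInner)
mutual
def pdcOuter : List String → List String → List String → List String × List String
  | [], desc, rem => (desc, rem)
  | l :: rest, desc, rem =>
    let stripped := PySem.Str.strip l
    if PySem.Str.startswith stripped "@Description" then
      let inline := PySem.Str.strip (PySem.Str.slice stripped (some 12) none)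
      pdcInner rest (if inline ≠ "" then desc ++ [inline] else desc) rem
    else
      pdcOuter rest desc (rem ++ [l])

def pdcInner : List String → List String → List String → List String × List String
  | [], desc, rem => (desc, rem)
  | l :: rest, desc, rem =>
    let cont := PySem.Str.strip l
    if cont = "" || PySem.Str.startswith cont "@" then
      pdcOuter rest desc (rem ++ [l])
    else
      pdcInner rest (desc ++ [cont]) rem
end

def parse_description_from_comment_alt (comment_text : String) : Option String × String :=
  let lines := PySem.Str.splitlines comment_text
  let dr := pdcOuter lines [] []
  let description := if dr.1 ≠ [] then some (PySem.Str.join " " dr.1) else none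
  let remaining_comment := PySem.Str.strip (PySem.Str.join "\n" dr.2)
  (description, if remaining_comment ≠ "" then remaining_comment else "")

-- ===== PRECONDITION & SPEC =====
def Spec_parse_description_from_comment (comment_text : String) (out : Option String × String) : Prop := out = parse_description_from_comment_alt comment_text
instance (comment_text : String) (out : Option String × String) : Decidable (Spec_parse_description_from_comment comment_text out) := by unfold Spec_parse_description_from_comment; infer_instance

-- ===== CLAIM (what is proved, stated in full; the proofs are below) =====
def Claim_equal_parse_description_from_comment : Prop := ∀ (comment_text : String), Dom_parse_description_from_comment comment_text → Spec_parse_description_from_comment comment_text (parse_description_from_comment comment_text)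

-- ===== LEMMAS AND PROOFS =====

-- A's fold from state (desc, rem, b) computes exactly B's inner (b = true) / outer (b = false) loop.
theorem pdc_fold_eq (lines : List String) :
    ∀ (desc rem : List String) (b : Bool),
      ((lines.foldl pdcStepA (desc, rem, b)).1, (lines.foldl pdcStepA (desc, rem, b)).2.1) =
        (if b then pdcInner lines desc rem else pdcOuter lines desc rem) := by
  induction lines with
  | nil =>
    intro desc rem b
    cases b <;> simp [pdcOuter, pdcInner]
  | cons l rest ih =>
    intro desc rem b
    cases b with
    | false =>
      by_cases h : PySem.Chars.startswith (PySem.Chars.strip l.toList)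
          ['@', 'D', 'e', 's', 'c', 'r', 'i', 'p', 't', 'i', 'o', 'n'] = true
      · simp only [List.foldl_cons]
        rw [show pdcStepA (desc, rem, false) l =
            (if PySem.Str.strip (PySem.Str.slice (PySem.Str.strip l) (some 12)) ≠ "" then
               desc ++ [PySem.Str.strip (PySem.Str.slice (PySem.Str.strip l) (some 12))]
             else desc, rem, true) from by simp [pdcStepA, h]]
        rw [ih]
        simp [pdcOuter, h]
      · simp only [List.foldl_cons]
        rw [show pdcStepA (desc, rem, false) l = (desc, rem ++ [l], false) from by
          simp [pdcStepA, h]]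
        rw [ih]
        simp [pdcOuter, h]
    | true =>
      by_cases h1 : PySem.Chars.strip l.toList = []
      · have h1s : PySem.Str.strip l = "" :=
          String.toList_inj.mp (by simp [PySem.Str.toList_strip, h1])
        simp only [List.foldl_cons]
        rw [show pdcStepA (desc, rem, true) l = (desc, rem ++ [l], false) from by
          simp [pdcStepA, h1s]]
        rw [ih]
        simp only [Bool.false_eq_true, if_false]
        conv_rhs => rw [pdcInner]
        simp [h1s]
      · by_cases h2 : PySem.Chars.startswith (PySem.Chars.strip l.toList) ['@'] = true
        · simp only [List.foldl_cons]
          rw [show pdcStepA (desc, rem, true) l = (desc, rem ++ [l], false) from by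
            simp [pdcStepA, h2]]
          rw [ih]
          simp only [Bool.false_eq_true, if_false]
          conv_rhs => rw [pdcInner]
          simp [h2]
        · have h1s : ¬ PySem.Str.strip l = "" := fun h => h1 (by rw [← PySem.Str.toList_strip, h]; rfl)
          simp only [List.foldl_cons]
          rw [show pdcStepA (desc, rem, true) l = (desc ++ [PySem.Str.strip l], rem, true) from by
            simp [pdcStepA, h1s, h2]]
          rw [ih]
          conv_rhs => rw [pdcInner]
          simp [h1s, h2]

-- ===== VERDICT (by name: the statement is the Claim_ definition above) =====
theorem parse_description_from_comment_spec : Claim_equal_parse_description_from_comment := by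
  intro ct _
  unfold Spec_parse_description_from_comment parse_description_from_comment parse_description_from_comment_alt
  have h := pdc_fold_eq (PySem.Str.splitlines ct) [] [] false
  simp only [Bool.false_eq_true, if_false] at h
  have h1 := congrArg Prod.fst h
  have h2 := congrArg Prod.snd h
  simp only at h1 h2
  dsimp only
  rw [h1, h2]
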